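-- pv_equiv track=rewrite | github.com/GitMonsters/octotetrahedral-agi | arc-puzzle-catalog/re-arc/solves/bd283c4a/solver.py | transform
-- ===== SOURCE A (Python) =====
-- from collections import Counter
--
-- def transform(input_grid: list[list[int]]) -> list[list[int]]:
--     rows = len(input_grid)
--     cols = len(input_grid[0])
--
--     counts: Counter = Counter()
--     for row in input_grid:
--         for val in row:
--             counts[val] += 1
--
--     sorted_colors = sorted(counts.items(), key=lambda x: -x[1])
--
--     output = [[0] * cols for _ in range(rows)]
--
--     color_idx = 0
--     remaining = sorted_colors[0][1]
--     current_color = sorted_colors[0][0]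
--
--     for c in range(cols):
--         for r in range(rows - 1, -1, -1):
--             if remaining == 0:
--                 color_idx += 1
--                 current_color = sorted_colors[color_idx][0]
--                 remaining = sorted_colors[color_idx][1]
--             output[r][c] = current_color
--             remaining -= 1
--
--     return output
-- ===== SOURCE B (Python) =====
-- def transform(input_grid: list[list[int]]) -> list[list[int]]:
--     rows = len(input_grid)
--     cols = len(input_grid[0])
--
--     counts = {}
--     for row in input_grid:
--         for v in row:
--             counts[v] = counts.get(v, 0) + 1
--
--     # counting sort by frequency: bucket colors by count, emit buckets from the
--     # highest frequency down (first-occurrence order inside a bucket = the stable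
--     # tie-break of sorting by -count)
--     buckets = {}
--     for color, cnt in counts.items():
--         buckets.setdefault(cnt, []).append(color)
--
--     seq = []
--     for f in range(max(counts.values()), 0, -1):
--         for color in buckets.get(f, []):
--             seq.extend([color] * f)
--
--     # cut the flat sequence into columns, flip each column bottom-up, transpose
--     columns = [seq[c * rows:(c + 1) * rows][::-1] for c in range(cols)]
--     return [[columns[c][r] for c in range(cols)] for r in range(rows)]
-- ===== Notes on version B (the rewrite author's own statement) =====
-- stated objective: alternative
-- what changed: B replaces A's comparison sort plus cell-by-cell scan with a color pointer by a counting sort (bucket colors by frequency, emit buckets from the highest frequency down, which reproduces the stable -count order) and then builds the grid structurally: cut the flat sequence into column chunks, reverse each chunk, and transpose, instead of A's mutating double loop over cells.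
-- outside the precondition, e.g. on transform([]): A raises IndexError, B raises IndexError
import Mathlib
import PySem

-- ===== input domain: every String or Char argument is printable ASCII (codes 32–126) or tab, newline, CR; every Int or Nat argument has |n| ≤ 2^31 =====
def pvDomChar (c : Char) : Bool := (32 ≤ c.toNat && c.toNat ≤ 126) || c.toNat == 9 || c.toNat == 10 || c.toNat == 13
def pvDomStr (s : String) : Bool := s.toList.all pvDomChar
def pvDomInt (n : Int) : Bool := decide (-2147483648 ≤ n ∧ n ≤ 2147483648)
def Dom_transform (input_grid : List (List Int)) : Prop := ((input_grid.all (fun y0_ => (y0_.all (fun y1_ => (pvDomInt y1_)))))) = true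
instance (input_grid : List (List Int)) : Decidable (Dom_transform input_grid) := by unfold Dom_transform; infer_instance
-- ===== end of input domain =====

-- B replaces A's comparison sort + cell scan with a running color pointer by a counting sort
-- over frequencies (bucket colors by count, emit buckets from the highest count down) and a
-- structural grid build (cut the flat sequence into column chunks, reverse each, transpose);
-- objective: alternative algorithm, same result.

-- ===== PORT A =====
-- A-side helper: the body of A's inner fill loop (one cell: maybe advance the color
-- pointer, write current_color at output[r][c], decrement remaining).
def transformCell (sorted_colors : List (Int × Int)) (c : Int)
    (st : List (List Int) × Int × Int × Int) (r : Int) : List (List Int) × Int × Int × Int :=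
  let output := st.1
  let color_idx := st.2.1
  let remaining := st.2.2.1
  let current_color := st.2.2.2
  let next : Int × Int × Int :=
    if remaining = 0 then
      (color_idx + 1,
       (PySem.List.pyGetD sorted_colors (color_idx + 1) (0, 0)).2,
       (PySem.List.pyGetD sorted_colors (color_idx + 1) (0, 0)).1)
    else (color_idx, remaining, current_color)
  -- output[r][c] = current_color; remaining -= 1  (indices are in range on every reached state)
  (PySem.List.pySetD output r
     (PySem.List.pySetD (PySem.List.pyGetD output r []) c next.2.2),
   next.1, next.2.1 - 1, next.2.2)

-- A-side helper: one iteration of A's outer loop (fill column c bottom-up).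
def transformCol (sorted_colors : List (Int × Int)) (rows : Int)
    (st : List (List Int) × Int × Int × Int) (c : Int) : List (List Int) × Int × Int × Int :=
  (PySem.List.pyRange (rows - 1) (-1) (-1)).foldl (transformCell sorted_colors c) st

def transform (input_grid : List (List Int)) : List (List Int) :=
  let rows : Int := input_grid.length
  let cols : Int := (input_grid.headD []).length
  let counts : PySem.Dict Int Int :=
    input_grid.foldl (fun counts row =>
      row.foldl (fun counts val => counts.modify val 0 (· + 1)) counts) PySem.Dict.empty
  let sorted_colors : List (Int × Int) := PySem.List.sorted counts.items (fun x => -x.2)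
  let output : List (List Int) := List.replicate rows.toNat (List.replicate cols.toNat (0 : Int))
  let st := (PySem.List.pyRange 0 cols 1).foldl (transformCol sorted_colors rows)
      (output, 0, (PySem.List.pyGetD sorted_colors 0 (0, 0)).2,
       (PySem.List.pyGetD sorted_colors 0 (0, 0)).1)
  st.1

-- ===== PORT B =====
def transform_alt (input_grid : List (List Int)) : List (List Int) :=
  let rows : Int := input_grid.length
  let cols : Int := (input_grid.headD []).length
  let counts : PySem.Dict Int Int :=
    input_grid.foldl (fun counts row =>
      row.foldl (fun counts val => counts.modify val 0 (· + 1)) counts) PySem.Dict.empty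
  let buckets : PySem.Dict Int (List Int) :=
    counts.items.foldl (fun b p => b.modify p.2 [] (fun l => l ++ [p.1])) PySem.Dict.empty
  -- max(counts.values()) raises ValueError on an empty dict; that case is outside Pre_
  let maxf : Int := ((PySem.List.max? counts.values (fun v => v)).getD 0)
  let seq : List Int :=
    (PySem.List.pyRange maxf 0 (-1)).foldl
      (fun seq f => (buckets.getD f []).foldl
        (fun seq color => seq ++ List.replicate f.toNat color) seq) []
  let columns : List (List Int) :=
    (PySem.List.pyRange 0 cols 1).map (fun c =>
      (PySem.List.slice seq (some (c * rows)) (some ((c + 1) * rows))).reverse)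
  (PySem.List.pyRange 0 rows 1).map (fun r =>
    (PySem.List.pyRange 0 cols 1).map (fun c =>
      PySem.List.pyGetD (PySem.List.pyGetD columns c []) r 0))

-- ===== PRECONDITION & SPEC =====
-- Pre_ is exactly where the Python A returns normally: the grid must contain at least one
-- value (on [] input_grid[0] raises IndexError, and with no values at all sorted_colors[0]
-- raises IndexError), and the values must cover all len(grid)*len(grid[0]) cells (on ragged
-- grids with fewer values, sorted_colors[color_idx] eventually raises IndexError).
def Pre_transform (input_grid : List (List Int)) : Prop :=
  0 < (input_grid.map List.length).sum ∧
    input_grid.length * (input_grid.headD []).length ≤ (input_grid.map List.length).sum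
instance (input_grid : List (List Int)) : Decidable (Pre_transform input_grid) := by
  unfold Pre_transform; infer_instance
def pvWitness_transform : List (List Int) := [[1, 2], [1, 1]]
def Spec_transform (input_grid : List (List Int)) (out : List (List Int)) : Prop := out = transform_alt input_grid
instance (input_grid : List (List Int)) (out : List (List Int)) : Decidable (Spec_transform input_grid out) := by unfold Spec_transform; infer_instance

-- ===== CLAIM (what is proved, stated in full; the proofs are below) =====
def Claim_equal_transform : Prop := ∀ (input_grid : List (List Int)), Dom_transform input_grid → Pre_transform input_grid → Spec_transform input_grid (transform input_grid)

-- ===== LEMMAS AND PROOFS =====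

-- run-length expansion of the (color, count) list, and its prefix sums
def pvSeq (cnts : List (Int × Int)) : List Int :=
  cnts.flatMap (fun p => List.replicate p.2.toNat p.1)
def pvS (cnts : List (Int × Int)) (j : Nat) : Nat :=
  ((cnts.take j).map (fun p => p.2.toNat)).sum

theorem pvS_succ (cnts : List (Int × Int)) (i : Nat) (h : i < cnts.length) :
    pvS cnts (i + 1) = pvS cnts i + (cnts.getD i (0, 0)).2.toNat := by
  unfold pvS
  rw [List.map_take, List.map_take,
    List.sum_take_succ (cnts.map (fun p => p.2.toNat)) i (by simpa using h)]
  simp [List.getD_eq_getElem?_getD, List.getElem?_eq_getElem h]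

theorem pvS_mono (cnts : List (Int × Int)) {i j : Nat} (h : i ≤ j) :
    pvS cnts i ≤ pvS cnts j := by
  unfold pvS
  rw [show j = i + (j - i) by omega, List.take_add]
  simp

theorem pvS_of_ge (cnts : List (Int × Int)) {j : Nat} (h : cnts.length ≤ j) :
    pvS cnts j = pvS cnts cnts.length := by
  simp [pvS, List.take_of_length_le h, List.take_length]

theorem pvSeq_getD (cnts : List (Int × Int)) (i k : Nat) (hi : i < cnts.length)
    (h1 : pvS cnts i ≤ k) (h2 : k < pvS cnts (i + 1)) :
    (pvSeq cnts).getD k 0 = (cnts.getD i (0, 0)).1 := by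
  induction cnts generalizing i k with
  | nil => simp at hi
  | cons hd t ih =>
    match i with
    | 0 =>
      have hk : k < hd.2.toNat := by simpa [pvS, List.take_add_one] using h2
      simp only [pvSeq, List.flatMap_cons, List.getD_eq_getElem?_getD]
      rw [List.getElem?_append_left (by simpa using hk)]
      simp [hk]
    | i + 1 =>
      have hS : ∀ j, pvS (hd :: t) (j + 1) = hd.2.toNat + pvS t j := by
        intro j; simp [pvS]
      have hk : hd.2.toNat ≤ k := by
        have := hS i; have h0 := pvS_mono t (Nat.zero_le i); omega
      have step : (pvSeq (hd :: t)).getD k 0 = (pvSeq t).getD (k - hd.2.toNat) 0 := by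
        simp only [pvSeq, List.flatMap_cons, List.getD_eq_getElem?_getD]
        rw [List.getElem?_append_right (by simpa using hk)]
        simp
      rw [step]
      have := ih i (k - hd.2.toNat) (by simpa using hi) (by have := hS i; omega)
        (by have := hS (i+1); omega)
      simpa using this

theorem pvSeq_length (cnts : List (Int × Int)) :
    (pvSeq cnts).length = pvS cnts cnts.length := by
  unfold pvSeq pvS
  rw [List.take_length, List.length_flatMap]
  simp

-- the invariant tying A's scalar state (color_idx, remaining, current_color) to the
-- number k of cells already filled
def pvGood (cnts : List (Int × Int)) (σ : Int × Int × Int) (k : Nat) : Prop :=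
  ∃ i : Nat, i < cnts.length ∧
    σ = ((i : Int), ((pvS cnts (i + 1) : Int) - k, (cnts.getD i (0, 0)).1)) ∧
    ((k = 0 ∧ i = 0) ∨ (pvS cnts i < k ∧ k ≤ pvS cnts (i + 1)))

theorem pvCellStep (cnts : List (Int × Int)) (hpos : ∀ p ∈ cnts, 0 < p.2)
    (σ : Int × Int × Int) (k : Nat) (hk : k < pvS cnts cnts.length)
    (hσ : pvGood cnts σ k) (G : List (List Int)) (c r : Int) :
    ∃ σ', transformCell cnts c (G, σ) r =
      (PySem.List.pySetD G r
        (PySem.List.pySetD (PySem.List.pyGetD G r []) c ((pvSeq cnts).getD k 0)), σ')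
      ∧ pvGood cnts σ' (k + 1) := by
  obtain ⟨i, hi, hσeq, hrange⟩ := hσ
  by_cases hrem : (pvS cnts (i + 1) : Int) - k = 0
  · -- remaining = 0: advance to run i+1
    have hkS : k = pvS cnts (i + 1) := by omega
    have hi1 : i + 1 < cnts.length := by
      by_contra hge
      have := pvS_of_ge cnts (j := i + 1) (by omega)
      omega
    have hmem : cnts.getD (i+1) (0,0) ∈ cnts := by
      rw [List.getD_eq_getElem _ _ hi1]; exact List.getElem_mem _
    have hposi := hpos _ hmem
    have hget : PySem.List.pyGetD cnts ((i : Int) + 1) (0,0) = cnts.getD (i+1) (0,0) := by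
      have hc : ((i : Int) + 1) = ((i + 1 : Nat) : Int) := by push_cast; ring
      rw [hc, PySem.List.pyGetD_natCast]
    have hS2 : pvS cnts (i + 1 + 1) = pvS cnts (i + 1) + (cnts.getD (i+1) (0,0)).2.toNat :=
      pvS_succ cnts (i+1) hi1
    have htn : ((cnts.getD (i+1) (0,0)).2.toNat : Int) = (cnts.getD (i+1) (0,0)).2 :=
      Int.toNat_of_nonneg (le_of_lt hposi)
    refine ⟨((i : Int) + 1, (cnts.getD (i+1) (0,0)).2 - 1, (cnts.getD (i+1) (0,0)).1), ?_, ?_⟩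
    · rw [pvSeq_getD cnts (i+1) k hi1 (le_of_eq hkS.symm) (by omega)]
      simp [transformCell, hσeq, hrem, hget]
    · refine ⟨i + 1, hi1, ?_, Or.inr ⟨by omega, by omega⟩⟩
      simp only [Prod.mk.injEq]
      exact ⟨by push_cast; ring, by omega, trivial⟩
  · -- remaining ≠ 0: stay in run i
    obtain ⟨hSk1, hSk2⟩ : pvS cnts i ≤ k ∧ k < pvS cnts (i + 1) := by
      have hz : pvS cnts 0 = 0 := rfl
      rcases hrange with ⟨hk0, hi0⟩ | ⟨hlt, hle⟩
      · subst hk0; subst hi0; constructor <;> omega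
      · constructor <;> omega
    refine ⟨((i : Int), (pvS cnts (i + 1) : Int) - k - 1, (cnts.getD i (0,0)).1), ?_, ?_⟩
    · rw [pvSeq_getD cnts i k hi hSk1 hSk2]
      simp [transformCell, hσeq, hrem]
    · refine ⟨i, hi, ?_, Or.inr ⟨by omega, by omega⟩⟩
      simp only [Prod.mk.injEq]
      exact ⟨trivial, by omega, trivial⟩

def pvGridOf (rows cols : Nat) (f : Nat → Nat → Int) : List (List Int) :=
  (List.range rows).map (fun r => (List.range cols).map (f r))

theorem pvGridOf_congr (rows cols : Nat) (f g : Nat → Nat → Int)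
    (h : ∀ r < rows, ∀ c < cols, f r c = g r c) :
    pvGridOf rows cols f = pvGridOf rows cols g := by
  unfold pvGridOf
  apply List.ext_getElem (by simp)
  intro n h1 h2
  simp only [List.getElem_map, List.getElem_range]
  apply List.ext_getElem (by simp)
  intro m m1 m2
  simp only [List.getElem_map, List.getElem_range]
  exact h n (by simpa using h1) m (by simpa using m1)

theorem pvSetRange {α : Type} (n : Nat) (g : Nat → α) (i : Nat) (v : α) :
    ((List.range n).map g).set i v = (List.range n).map (fun j => if j = i then v else g j) := by
  apply List.ext_getElem (by simp)
  intro m m1 m2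
  simp only [List.getElem_set, List.getElem_map, List.getElem_range]
  by_cases hm : i = m <;> simp [hm]
  omega

theorem pvGridWrite (rows cols : Nat) (f : Nat → Nat → Int) (r c : Nat)
    (hr : r < rows) (_hc : c < cols) (v : Int) :
    PySem.List.pySetD (pvGridOf rows cols f) (r : Int)
      (PySem.List.pySetD (PySem.List.pyGetD (pvGridOf rows cols f) (r : Int) []) (c : Int) v)
    = pvGridOf rows cols (fun r' c' => if r' = r ∧ c' = c then v else f r' c') := by
  unfold pvGridOf
  rw [PySem.List.pyGetD_natCast, PySem.List.pySetD_natCast, PySem.List.pySetD_natCast]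
  rw [List.getD_eq_getElem _ _ (by simpa using hr)]
  simp only [List.getElem_map, List.getElem_range]
  rw [pvSetRange, pvSetRange]
  apply List.ext_getElem (by simp)
  intro n h1 h2
  simp only [List.getElem_map, List.getElem_range]
  by_cases hn : n = r
  · subst hn
    apply List.ext_getElem (by simp)
    intro m m1 m2
    simp only [List.getElem_map, List.getElem_range]
    by_cases hm : m = c <;> simp [hm]
  · simp only [if_neg hn]
    apply List.ext_getElem (by simp)
    intro m m1 m2
    simp [hn]

def pvPartial (cnts : List (Int × Int)) (rows cols k : Nat) : List (List Int) :=
  pvGridOf rows cols (fun r c =>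
    if c * rows + (rows - 1 - r) < k then (pvSeq cnts).getD (c * rows + (rows - 1 - r)) 0 else 0)

theorem pvPosInj (rows c1 c2 r1 r2 : Nat) (h1 : r1 < rows) (h2 : r2 < rows)
    (h : c1 * rows + (rows - 1 - r1) = c2 * rows + (rows - 1 - r2)) : c1 = c2 ∧ r1 = r2 := by
  rcases Nat.lt_trichotomy c1 c2 with h' | h' | h'
  · exfalso
    have hm : (c1 + 1) * rows ≤ c2 * rows := Nat.mul_le_mul_right _ (by omega)
    have e1 : (c1 + 1) * rows = c1 * rows + rows := by ring
    omega
  · subst h'; omega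
  · exfalso
    have hm : (c2 + 1) * rows ≤ c1 * rows := Nat.mul_le_mul_right _ (by omega)
    have e1 : (c2 + 1) * rows = c2 * rows + rows := by ring
    omega

theorem pvInner (cnts : List (Int × Int)) (hpos : ∀ p ∈ cnts, 0 < p.2)
    (rows cols : Nat) (htot : rows * cols ≤ pvS cnts cnts.length) :
    ∀ t, t ≤ rows → ∀ c, c < cols → ∀ σ k, k = c * rows + (rows - t) →
    pvGood cnts σ k →
    ∃ σ', (PySem.List.pyRange ((t : Int) - 1) (-1) (-1)).foldl
        (transformCell cnts (c : Int)) (pvPartial cnts rows cols k, σ)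
      = (pvPartial cnts rows cols (k + t), σ') ∧ pvGood cnts σ' (k + t) := by
  intro t
  induction t with
  | zero =>
    intro _ c hc σ k hk hσ
    rw [PySem.List.pyRange_neg_one_eq_nil (by omega)]
    exact ⟨σ, by simp, by simpa using hσ⟩
  | succ t ih =>
    intro ht c hc σ k hk hσ
    have hmul : c * rows + rows ≤ rows * cols := by
      have h1 : (c + 1) * rows ≤ cols * rows := Nat.mul_le_mul_right _ (by omega)
      calc c * rows + rows = (c + 1) * rows := by ring
        _ ≤ cols * rows := h1
        _ = rows * cols := Nat.mul_comm _ _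
    have hkS : k < pvS cnts cnts.length := by omega
    obtain ⟨σ₁, hcell, hgood₁⟩ := pvCellStep cnts hpos σ k hkS hσ
      (pvPartial cnts rows cols k) (c : Int) (t : Int)
    have hr : t < rows := by omega
    have hposk : c * rows + (rows - 1 - t) = k := by omega
    have hwrite : PySem.List.pySetD (pvPartial cnts rows cols k) ((t : Nat) : Int)
        (PySem.List.pySetD (PySem.List.pyGetD (pvPartial cnts rows cols k) ((t : Nat) : Int) [])
          ((c : Nat) : Int) ((pvSeq cnts).getD k 0))
        = pvPartial cnts rows cols (k + 1) := by
      unfold pvPartial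
      rw [pvGridWrite rows cols _ t c hr hc]
      apply pvGridOf_congr
      intro r' hr' c' hc'
      by_cases hcc : r' = t ∧ c' = c
      · obtain ⟨he1, he2⟩ := hcc; subst he1; subst he2
        simp [hposk]
      · rw [if_neg hcc]
        have hne : c' * rows + (rows - 1 - r') ≠ k := by
          intro he
          have hinj := pvPosInj rows c' c r' t hr' hr (by omega)
          exact hcc ⟨hinj.2, hinj.1⟩
        rcases Nat.lt_or_ge (c' * rows + (rows - 1 - r')) k with hlt | hge
        · rw [if_pos hlt, if_pos (by omega)]
        · rw [if_neg (by omega), if_neg (by omega)]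
    have hstep : (((t + 1 : Nat)) : Int) - 1 = ((t : Nat) : Int) := by push_cast; ring
    rw [hstep, PySem.List.pyRange_neg_one_cons (by omega), List.foldl_cons, hcell, hwrite]
    obtain ⟨σ', hfold, hgood'⟩ := ih (by omega) c hc σ₁ (k + 1) (by omega) hgood₁
    refine ⟨σ', ?_, ?_⟩
    · have e : k + (t + 1) = k + 1 + t := by omega
      rw [e]
      exact hfold
    · have : k + 1 + t = k + (t + 1) := by omega
      rwa [this] at hgood'

theorem pvOuter (cnts : List (Int × Int)) (hpos : ∀ p ∈ cnts, 0 < p.2)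
    (rows cols : Nat) (htot : rows * cols ≤ pvS cnts cnts.length) :
    ∀ u, u ≤ cols → ∀ σ, pvGood cnts σ ((cols - u) * rows) →
    ∃ σ', (PySem.List.pyRange (((cols - u : Nat)) : Int) ((cols : Nat) : Int) 1).foldl
        (transformCol cnts ((rows : Nat) : Int)) (pvPartial cnts rows cols ((cols - u) * rows), σ)
      = (pvPartial cnts rows cols (cols * rows), σ') := by
  intro u
  induction u with
  | zero =>
    intro _ σ hσ
    rw [PySem.List.pyRange_one_eq_nil (by omega)]
    exact ⟨σ, by simp⟩
  | succ u ih =>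
    intro hu σ hσ
    have hclt : cols - (u + 1) < cols := by omega
    rw [PySem.List.pyRange_one_cons (by exact_mod_cast hclt)]
    rw [List.foldl_cons]
    unfold transformCol
    obtain ⟨σ₁, hfold, hgood₁⟩ := pvInner cnts hpos rows cols htot rows (le_refl _)
      (cols - (u + 1)) hclt σ ((cols - (u + 1)) * rows) (by omega) hσ
    rw [hfold]
    have e3 : (cols - (u + 1)) * rows + rows = (cols - u) * rows := by
      have : cols - u = (cols - (u + 1)) + 1 := by omega
      rw [this]; ring
    have e4 : ((cols - (u + 1) : Nat) : Int) + 1 = ((cols - u : Nat) : Int) := by omega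
    have hgood₂ : pvGood cnts σ₁ ((cols - u) * rows) := by
      rw [← e3]
      have : (cols - (u + 1)) * rows + rows = (cols - (u+1)) * rows + rows := rfl
      simpa [e3] using hgood₁
    obtain ⟨σ', hfold'⟩ := ih (by omega) σ₁ hgood₂
    rw [e4]
    have e5 : (cols - (u + 1)) * rows + rows = (cols - u) * rows := e3
    rw [e5]
    exact ⟨σ', hfold'⟩

-- ---- B-side lemmas: stable sort by -count = counting sort over frequencies ----

theorem pvInsertBy_cons {α : Type} (before : α → α → Bool) (x y : α) (ys : List α) :
    PySem.List.insertBy before x (y :: ys) =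
      if before x y then x :: y :: ys else y :: PySem.List.insertBy before x ys := rfl

theorem pvInsertBy_append {α : Type} (before : α → α → Bool) (x : α) (l1 l2 : List α)
    (h : ∀ y ∈ l1, before x y = false) :
    PySem.List.insertBy before x (l1 ++ l2) = l1 ++ PySem.List.insertBy before x l2 := by
  induction l1 with
  | nil => simp
  | cons y ys ih =>
    rw [List.cons_append, pvInsertBy_cons, h y (by simp),
      ih (fun z hz => h z (by simp [hz]))]
    simp

theorem pvInsertBy_all {α : Type} (before : α → α → Bool) (x : α) (l : List α)
    (h : ∀ y ∈ l, before x y = true) :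
    PySem.List.insertBy before x l = x :: l := by
  cases l with
  | nil => rfl
  | cons y ys => rw [pvInsertBy_cons, h y (by simp)]; simp

theorem pvFlatMap_congr {α β : Type} {l : List α} {f g : α → List β}
    (h : ∀ a ∈ l, f a = g a) : l.flatMap f = l.flatMap g := by
  induction l with
  | nil => rfl
  | cons a t ih =>
    rw [List.flatMap_cons, List.flatMap_cons, h a (by simp),
      ih (fun b hb => h b (by simp [hb]))]

theorem pvInsert_flatMap {α κ : Type} [LinearOrder κ] (key : α → κ) (x : α)
    (ks : List κ) (F : κ → List α)
    (hks : ks.Pairwise (· < ·)) (hF : ∀ k ∈ ks, ∀ y ∈ F k, key y = k) (hv : key x ∈ ks) :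
    PySem.List.insertBy (fun a b => decide (key a < key b)) x (ks.flatMap F)
      = ks.flatMap (fun k => F k ++ if key x = k then [x] else []) := by
  induction ks with
  | nil => simp at hv
  | cons k ks ih =>
    rw [List.pairwise_cons] at hks
    obtain ⟨hklt, hks'⟩ := hks
    rw [List.flatMap_cons, List.flatMap_cons]
    by_cases hx : key x = k
    · rw [pvInsertBy_append _ _ _ _ (fun y hy => by
        simp [hF k (by simp) y hy, hx]),
        pvInsertBy_all _ _ _ (fun y hy => ?_)]
      · rw [if_pos hx]
        have hrest : ks.flatMap (fun k' => F k' ++ if key x = k' then [x] else [])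
            = ks.flatMap F := by
          apply pvFlatMap_congr
          intro k' hk'
          rw [if_neg (by rw [hx]; exact ne_of_lt (hklt k' hk'))]
          simp
        rw [hrest]
        simp
      · obtain ⟨k', hk', hyF⟩ := List.mem_flatMap.1 hy
        have h1 : key y = k' := hF k' (by simp [hk']) y hyF
        have h2 : k < k' := hklt k' hk'
        simp [h1, hx, h2]
    · have hv' : key x ∈ ks := by
        rcases List.mem_cons.1 hv with h | h
        · exact absurd h hx
        · exact h
      have hkx : k < key x := hklt _ hv'
      rw [pvInsertBy_append _ _ _ _ (fun y hy => by
        show decide (key x < key y) = false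
        rw [hF k (by simp) y hy]
        exact decide_eq_false (lt_asymm hkx)),
        ih hks' (fun k' hk' y hy => hF k' (by simp [hk']) y hy) hv', if_neg hx]
      simp

theorem pvSorted_eq_flatMap_filter {α κ : Type} [LinearOrder κ] (xs : List α) (key : α → κ)
    (ks : List κ) (hks : ks.Pairwise (· < ·)) (hmem : ∀ x ∈ xs, key x ∈ ks) :
    PySem.List.sorted xs key false
      = ks.flatMap (fun k => xs.filter (fun x => decide (key x = k))) := by
  induction xs using List.reverseRecOn with
  | nil =>
    rw [PySem.List.sorted_eq_foldl_insertBy]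
    simp
  | append_singleton xs x ih =>
    rw [PySem.List.sorted_eq_foldl_insertBy, List.foldl_append, List.foldl_cons,
      List.foldl_nil, ← PySem.List.sorted_eq_foldl_insertBy,
      ih (fun y hy => hmem y (by simp [hy])),
      pvInsert_flatMap key x ks _ hks
        (fun k hk y hy => of_decide_eq_true (List.mem_filter.1 hy).2)
        (hmem x (by simp))]
    apply pvFlatMap_congr
    intro k hk
    rw [List.filter_append]
    by_cases hx : key x = k <;> simp [hx]

theorem pvBucket_getD (items : List (Int × Int)) (d : PySem.Dict Int (List Int)) (f : Int) :
    ((items.foldl (fun b p => b.modify p.2 [] (fun l => l ++ [p.1])) d).getD f [])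
      = d.getD f [] ++ (items.filter (fun p => decide (p.2 = f))).map Prod.fst := by
  induction items generalizing d with
  | nil => simp
  | cons p t ih =>
    rw [List.foldl_cons, ih, PySem.Dict.getD_modify]
    by_cases hp : f = p.2
    · subst hp
      rw [if_pos rfl, List.filter_cons, if_pos (by simp), List.map_cons]
      simp
    · rw [if_neg hp, List.filter_cons,
        if_neg (by simp only [decide_eq_true_eq]; exact fun h => hp h.symm)]

theorem pvSeqFold (B : Int → List Int) (l : List Int) (s : List Int) :
    l.foldl (fun s f => (B f).foldl (fun s c => s ++ List.replicate f.toNat c) s) s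
      = s ++ l.flatMap (fun f => (B f).flatMap (fun c => List.replicate f.toNat c)) := by
  induction l generalizing s with
  | nil => simp
  | cons f t ih =>
    rw [List.foldl_cons, PySem.List.foldl_append_eq_flatMap, ih, List.flatMap_cons,
      List.append_assoc]

theorem pvGetD_map_range {α : Type} (n : Nat) (h : Nat → α) (c : Nat) (hc : c < n) (d : α) :
    PySem.List.pyGetD ((List.range n).map h) (c : Int) d = h c := by
  rw [PySem.List.pyGetD_natCast, List.getD_eq_getElem _ _ (by simpa using hc)]
  simp

-- ---- the main equivalence ----

theorem transform_eq (g : List (List Int))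
    (hpos0 : 0 < (g.map List.length).sum)
    (hcov : g.length * (g.headD []).length ≤ (g.map List.length).sum) :
    transform g = transform_alt g := by
  have hgne : g ≠ [] := by rintro rfl; simp at hpos0
  have hrows_pos : 0 < g.length := List.length_pos_iff.2 hgne
  set flat := g.flatten with hflat
  have hlen : (g.map List.length).sum = flat.length := (List.length_flatten (L := g)).symm
  have hcounts : (g.foldl (fun counts row =>
      row.foldl (fun counts val => PySem.Dict.modify counts val 0 (· + 1)) counts)
      PySem.Dict.empty) = PySem.Dict.counter flat := by
    rw [PySem.Dict.counter_eq_foldl, hflat, List.foldl_flatten]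
  set cnts := PySem.List.sorted (PySem.Dict.counter flat).items (fun x : Int × Int => -x.2)
    with hcnts
  set rows := g.length with hrowsdef
  set cols := (g.headD []).length with hcolsdef
  have hitems := PySem.Dict.items_counter (xs := flat)
  have hposc : ∀ p ∈ cnts, 0 < p.2 := by
    intro p hp
    rw [hcnts, PySem.List.mem_sorted, hitems] at hp
    obtain ⟨k, hk, rfl⟩ := List.mem_map.1 hp
    have : k ∈ flat := (PySem.Set.mem_ofList _ _).1 hk
    simpa using (List.count_pos_iff.2 this : 0 < flat.count k)
  have hperm : cnts.Perm (PySem.Dict.counter flat).items := PySem.List.sorted_perm _ _ _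
  have hdperm : (PySem.Set.ofList flat).Perm flat.dedup := by
    apply List.Perm.symm
    apply List.perm_of_nodup_nodup_toFinset_eq flat.nodup_dedup (PySem.Set.nodup_ofList _)
    ext x; simp [PySem.Set.mem_ofList]
  have hsum : pvS cnts cnts.length = flat.length := by
    unfold pvS
    rw [List.take_length]
    have h1 := (hperm.map (fun p : Int × Int => p.2.toNat)).sum_eq
    rw [h1, hitems, List.map_map]
    have h2 : ((PySem.Set.ofList flat).map
        ((fun p : Int × Int => p.2.toNat) ∘ (fun k => (k, (flat.count k : Int))))).sum
        = ((PySem.Set.ofList flat).map (fun k => flat.count k)).sum := by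
      rfl
    rw [h2, (hdperm.map (fun k => flat.count k)).sum_eq,
      List.sum_map_count_dedup_eq_length flat]
  have htot : rows * cols ≤ pvS cnts cnts.length := by rw [hsum, ← hlen]; exact hcov
  have hS0 : 0 < pvS cnts cnts.length := by rw [hsum, ← hlen]; exact hpos0
  have hcne : 0 < cnts.length := by
    by_contra h
    have : cnts.length = 0 := by omega
    rw [this] at hS0
    simp [pvS] at hS0
  -- initial scalar state
  have hmem0 : cnts.getD 0 (0,0) ∈ cnts := by
    rw [List.getD_eq_getElem _ _ hcne]; exact List.getElem_mem _
  have hposc0 := hposc _ hmem0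
  have hS1 : pvS cnts 1 = (cnts.getD 0 (0,0)).2.toNat := by
    have h := pvS_succ cnts 0 hcne
    have hz : pvS cnts 0 = 0 := rfl
    simp only [Nat.zero_add] at h
    omega
  have hgood0 : pvGood cnts ((0:Int), (cnts.getD 0 (0,0)).2, (cnts.getD 0 (0,0)).1) 0 := by
    refine ⟨0, hcne, ?_, Or.inl ⟨rfl, rfl⟩⟩
    simp only [Prod.mk.injEq]
    refine ⟨by simp, ?_, trivial⟩
    rw [hS1]
    omega
  have hgrid0 : List.replicate ((rows : Int)).toNat (List.replicate ((cols : Int)).toNat (0:Int))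
      = pvPartial cnts rows cols 0 := by
    simp [pvPartial, pvGridOf, List.map_const']
  obtain ⟨σf, hfold⟩ := pvOuter cnts hposc rows cols htot cols (le_refl _)
      ((0:Int), (cnts.getD 0 (0,0)).2, (cnts.getD 0 (0,0)).1)
      (by simpa [Nat.sub_self] using hgood0)
  simp only [Nat.sub_self, Nat.zero_mul, Nat.cast_zero] at hfold
  have hA : transform g = pvPartial cnts rows cols (cols * rows) := by
    simp only [transform]
    rw [hcounts, ← hcnts, PySem.List.pyGetD_zero, hgrid0, hfold]
  -- ---- B side ----
  set items := (PySem.Dict.counter flat).items with hitemsdef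
  have hpositems : ∀ p ∈ items, 0 < p.2 := by
    intro p hp
    exact hposc p (by rw [hcnts, PySem.List.mem_sorted]; exact hp)
  have hitne : items ≠ [] := by
    intro he
    have : cnts = [] := by
      rw [hcnts, PySem.List.sorted_eq_nil_iff]; exact he
    rw [this] at hcne; simp at hcne
  -- maxf
  have hvals : (PySem.Dict.counter flat).values = items.map Prod.snd := rfl
  obtain ⟨m, hm⟩ : ∃ m, PySem.List.max? (PySem.Dict.counter flat).values (fun v => v) = some m := by
    cases he : PySem.List.max? (PySem.Dict.counter flat).values (fun v => v) with
    | none =>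
      rw [PySem.List.max?_eq_none_iff, hvals, List.map_eq_nil_iff] at he
      exact absurd he hitne
    | some m => exact ⟨m, rfl⟩
  have hmax : ∀ p ∈ items, p.2 ≤ m := by
    intro p hp
    exact PySem.List.max?_isMax hm p.2 (by rw [hvals]; exact List.mem_map_of_mem hp)
  have hm_mem : m ∈ items.map Prod.snd := by
    rw [← hvals]; exact PySem.List.max?_mem hm
  have hm_pos : 0 < m := by
    obtain ⟨p, hp, rfl⟩ := List.mem_map.1 hm_mem
    exact hpositems p hp
  set fs := PySem.List.pyRange m 0 (-1) with hfsdef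
  have hfs_pair : fs.Pairwise (fun a b => b < a) := by
    rw [hfsdef, PySem.List.pyRange_neg_one_eq_reverse, List.pairwise_reverse]
    exact PySem.List.pairwise_lt_pyRange_one _ _
  have hks_pair : (fs.map (fun f => -f)).Pairwise (fun a b : Int => a < b) := by
    exact List.Pairwise.map _ (fun a b h => by omega) hfs_pair
  have hmem_fs : ∀ x : Int, x ∈ fs ↔ 0 < x ∧ x ≤ m := by
    intro x; rw [hfsdef, PySem.List.mem_pyRange_neg_one]
  -- characterize the stable sort as bucket concatenation
  have hchar : cnts = fs.flatMap (fun f => items.filter (fun p => decide (p.2 = f))) := by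
    rw [hcnts,
      pvSorted_eq_flatMap_filter items (fun p : Int × Int => -p.2) (fs.map (fun f => -f))
        hks_pair
        (fun p hp => List.mem_map.2 ⟨p.2, (hmem_fs p.2).2 ⟨hpositems p hp, hmax p hp⟩, rfl⟩),
      List.flatMap_map]
    apply pvFlatMap_congr
    intro f hf
    apply List.filter_congr
    intro p hp
    simp only [decide_eq_decide]
    omega
  -- B's seq is pvSeq cnts
  have hbucket : ∀ f : Int,
      ((items.foldl (fun b p => b.modify p.2 [] (fun l => l ++ [p.1]))
          PySem.Dict.empty).getD f [])
        = (items.filter (fun p => decide (p.2 = f))).map Prod.fst := by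
    intro f
    rw [pvBucket_getD, PySem.Dict.getD_empty]
    simp
  have hseq : (fs.foldl
      (fun seq f => ((items.foldl (fun b p => b.modify p.2 [] (fun l => l ++ [p.1]))
          PySem.Dict.empty).getD f []).foldl
        (fun seq color => seq ++ List.replicate f.toNat color) seq) ([] : List Int))
      = pvSeq cnts := by
    rw [pvSeqFold, List.nil_append, hchar]
    unfold pvSeq
    rw [List.flatMap_assoc]
    apply pvFlatMap_congr
    intro f hf
    rw [hbucket f, List.flatMap_map]
    apply pvFlatMap_congr
    intro p hp
    have : p.2 = f := of_decide_eq_true (List.mem_filter.1 hp).2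
    simp [this]
  -- B's output grid
  have hseqlen : (pvSeq cnts).length = flat.length := by rw [pvSeq_length, hsum]
  have hB : transform_alt g = pvGridOf rows cols
      (fun r c => (pvSeq cnts).getD (c * rows + (rows - 1 - r)) 0) := by
    simp only [transform_alt]
    rw [hcounts, ← hitemsdef, hm, Option.getD_some, ← hfsdef, hseq]
    rw [PySem.List.pyRange_zero_natCast, PySem.List.pyRange_zero_natCast, ← hrowsdef, ← hcolsdef]
    unfold pvGridOf
    simp only [List.map_map]
    apply List.map_congr_left
    intro r hr
    simp only [Function.comp]
    apply List.map_congr_left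
    intro c hc
    rw [List.mem_range] at hr hc
    simp only [Function.comp_apply]
    -- columns[c]
    rw [pvGetD_map_range cols _ c hc]
    simp only [Function.comp_apply]
    have hcast1 : ((c : Int) * (rows : Int)) = ((c * rows : Nat) : Int) := by push_cast; ring
    have hcast2 : (((c : Int) + 1) * (rows : Int)) = ((c * rows : Nat) : Int) + ((rows : Nat) : Int) := by
      push_cast; ring
    rw [hcast1, hcast2, PySem.List.slice_natCast_add]
    set L := ((pvSeq cnts).drop (c * rows)).take rows with hLdef
    have hfit : c * rows + rows ≤ (pvSeq cnts).length := by
      rw [hseqlen, ← hlen]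
      have h1 : (c + 1) * rows ≤ cols * rows := Nat.mul_le_mul_right _ (by omega)
      have e1 : (c + 1) * rows = c * rows + rows := by ring
      have e2 : cols * rows = rows * cols := Nat.mul_comm _ _
      omega
    have hLlen : L.length = rows := by
      rw [hLdef, List.length_take, List.length_drop]
      omega
    have hr' : r < L.reverse.length := by rw [List.length_reverse, hLlen]; exact hr
    rw [PySem.List.pyGetD_natCast, List.getD_eq_getElem _ _ hr', List.getElem_reverse]
    have hidx : L.length - 1 - r < L.length := by omega
    rw [List.getElem_take, List.getElem_drop]
    rw [List.getD_eq_getElem _ _ (by omega : c * rows + (rows - 1 - r) < (pvSeq cnts).length)]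
    congr 1
    omega
  rw [hA, hB]
  apply pvGridOf_congr
  intro r hr c hc
  have hmc : (c + 1) * rows ≤ cols * rows := Nat.mul_le_mul_right _ (by omega)
  have e1 : (c + 1) * rows = c * rows + rows := by ring
  rw [if_pos (by omega)]

-- ===== VERDICT (by name: the statement is the Claim_ definition above) =====
theorem transform_spec : Claim_equal_transform := by
  intro input_grid _ hpre
  unfold Spec_transform
  exact transform_eq input_grid hpre.1 hpre.2
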